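-- pv_equiv track=rewrite | github.com/AdrianSuliga/ADS | BIT/Egzaminy_Probne/egzP5a/egzP5a.py | inwestor
-- ===== SOURCE A (Python) =====
-- def inwestor(T):
--     n = len(T)
--     Stack = [-1, 0]
--     result = 0
--
--     LS = [-1 for _ in range(n)]
--     RS = [n for _ in range(n)]
--
--     for i in range(1, n):
--         while Stack[-1] != -1 and T[Stack[-1]] > T[i]:
--             RS[Stack[-1]] = i
--             Stack.pop()
--
--         if T[i] == T[i - 1]:
--             LS[i] = LS[i - 1]
--         else:
--             LS[i] = Stack[-1]
--
--         Stack.append(i)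
--
--     for i in range(n):
--         result = max(result, T[i] * (RS[i] - LS[i] - 1))
--
--     return result
-- ===== SOURCE B (Python) =====
-- def inwestor(T):
--     # For each index i, scan directly for the nearest strictly smaller
--     # neighbours on both sides; the best value of T[i] * span is the answer.
--     n = len(T)
--     result = 0
--     for i in range(n):
--         l = i - 1
--         while l >= 0 and T[l] >= T[i]:
--             l -= 1
--         r = i + 1
--         while r < n and T[r] >= T[i]:
--             r += 1
--         result = max(result, T[i] * (r - l - 1))
--     return result
-- ===== Notes on version B (the rewrite author's own statement) =====
-- stated objective: simpler
-- what changed: Replaced the stack-based precomputation of LS/RS arrays plus a second pass by a direct per-index two-sided scan for the nearest strictly smaller element, folding the running maximum in one loop.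
import Mathlib
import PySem

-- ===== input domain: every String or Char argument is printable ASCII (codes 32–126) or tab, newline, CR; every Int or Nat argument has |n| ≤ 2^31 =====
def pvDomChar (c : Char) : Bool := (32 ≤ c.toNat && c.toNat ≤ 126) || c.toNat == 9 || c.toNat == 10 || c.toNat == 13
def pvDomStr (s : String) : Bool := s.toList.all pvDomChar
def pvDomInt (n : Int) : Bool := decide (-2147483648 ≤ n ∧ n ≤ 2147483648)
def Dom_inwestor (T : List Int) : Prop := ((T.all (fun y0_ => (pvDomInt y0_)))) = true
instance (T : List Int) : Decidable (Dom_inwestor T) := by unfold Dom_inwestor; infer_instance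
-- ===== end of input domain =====

-- B replaces A's stack-based LS/RS precomputation and second pass by a direct
-- per-index two-sided scan for the nearest strictly smaller element (simpler).

-- ===== PORT A =====
-- the inner 'while Stack[-1] != -1 and T[Stack[-1]] > T[i]: RS[Stack[-1]] = i; Stack.pop()'
-- (the 'St ≠ []' conjunct is a totality guard only: the sentinel -1 is never popped)
def popA (T : List Int) (i : Int) (St RS : List Int) : List Int × List Int :=
  if h : St ≠ [] ∧ PySem.List.pyGetD St (-1) 0 ≠ -1 ∧
         PySem.List.pyGetD T (PySem.List.pyGetD St (-1) 0) 0 > PySem.List.pyGetD T i 0 then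
    popA T i St.dropLast (PySem.List.pySetD RS (PySem.List.pyGetD St (-1) 0) i)
  else (St, RS)
termination_by St.length
decreasing_by simp [List.length_dropLast]; exact List.length_pos_of_ne_nil h.1

-- the body of 'for i in range(1, n)'
def stepA (T : List Int) (s : List Int × List Int × List Int) (i : Int) :
    List Int × List Int × List Int :=
  let p := popA T i s.1 s.2.2
  let lsv := if PySem.List.pyGetD T i 0 = PySem.List.pyGetD T (i - 1) 0
             then PySem.List.pyGetD s.2.1 (i - 1) 0
             else PySem.List.pyGetD p.1 (-1) 0
  (p.1 ++ [i], PySem.List.pySetD s.2.1 i lsv, p.2)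

def inwestor (T : List Int) : Int :=
  let n : Int := T.length
  let LS0 : List Int := (PySem.List.pyRange 0 n 1).map (fun _ => (-1 : Int))
  let RS0 : List Int := (PySem.List.pyRange 0 n 1).map (fun _ => n)
  let fin := (PySem.List.pyRange 1 n 1).foldl (stepA T) ([-1, 0], LS0, RS0)
  (PySem.List.pyRange 0 n 1).foldl
    (fun result i =>
      max result (PySem.List.pyGetD T i 0 *
        (PySem.List.pyGetD fin.2.2 i 0 - PySem.List.pyGetD fin.2.1 i 0 - 1))) 0

-- ===== PORT B =====
-- 'while l >= 0 and T[l] >= T[i]: l -= 1'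
def scanL (T : List Int) (h : Int) (l : Int) : Int :=
  if c : 0 ≤ l ∧ PySem.List.pyGetD T l 0 ≥ h then scanL T h (l - 1) else l
termination_by (l + 1).toNat
decreasing_by omega

-- 'while r < n and T[r] >= T[i]: r += 1'
def scanR (T : List Int) (h n r : Int) : Int :=
  if c : r < n ∧ PySem.List.pyGetD T r 0 ≥ h then scanR T h n (r + 1) else r
termination_by (n - r).toNat
decreasing_by omega

def inwestor_alt (T : List Int) : Int :=
  let n : Int := T.length
  (PySem.List.pyRange 0 n 1).foldl
    (fun result i =>
      let l := scanL T (PySem.List.pyGetD T i 0) (i - 1)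
      let r := scanR T (PySem.List.pyGetD T i 0) n (i + 1)
      max result (PySem.List.pyGetD T i 0 * (r - l - 1))) 0

-- ===== PRECONDITION & SPEC =====
def Spec_inwestor (T : List Int) (out : Int) : Prop := out = inwestor_alt T
instance (T : List Int) (out : Int) : Decidable (Spec_inwestor T out) := by unfold Spec_inwestor; infer_instance

-- ===== CLAIM (what is proved, stated in full; the proofs are below) =====
def Claim_equal_inwestor : Prop := ∀ (T : List Int), Dom_inwestor T → Spec_inwestor T (inwestor T)

-- ===== LEMMAS AND PROOFS =====

-- value of T at a Nat index (all accesses in both programs are in range)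
def tg (T : List Int) (j : Nat) : Int := T.getD j 0

-- 'j's value is ≤ every value strictly between j and m'
def goodB (T : List Int) (m j : Nat) : Bool :=
  (List.range' (j+1) (m - (j+1))).all (fun k => decide (tg T j ≤ tg T k))

-- the stack contents (above the -1 sentinel) after the loop has processed i = 1..m-1
def stkSpec (T : List Int) (m : Nat) : List Nat := (List.range m).filter (goodB T m)

-- first index in (j, m) whose value is < tg T j, else len T  (the meaning of RS[j])
def rPart (T : List Int) (m j : Nat) : Int :=
  match (List.range' (j+1) (m - (j+1))).find? (fun k => decide (tg T k < tg T j)) with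
  | some k => (k : Int)
  | none => (T.length : Int)

-- the stack top right after the popping phase of iteration m
def gA (T : List Int) (m : Nat) : Int :=
  match ((stkSpec T m).filter (fun k => decide (tg T k ≤ tg T m))).getLast? with
  | some k => (k : Int)
  | none => -1

-- closed form of A's LS[j]
def lsA (T : List Int) : Nat → Int
  | 0 => -1
  | j+1 => if tg T (j+1) = tg T j then lsA T j else gA T (j+1)

def lsSpec (T : List Int) (m : Nat) : List Int :=
  (List.range T.length).map (fun j => if j < m then lsA T j else -1)

def rsSpec (T : List Int) (m : Nat) : List Int :=
  (List.range T.length).map (fun j => rPart T m j)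

-- ---------- generic list lemmas ----------

theorem getLast?_of_pairwise_lt {l : List Nat} (hp : l.Pairwise (· < ·)) {x : Nat}
    (hx : x ∈ l) (hmax : ∀ y ∈ l, y ≤ x) : l.getLast? = some x := by
  induction l with
  | nil => cases hx
  | cons a l ih =>
    cases l with
    | nil =>
      simp only [List.mem_singleton] at hx
      subst hx; rfl
    | cons b l2 =>
      rw [List.getLast?_cons_cons]
      have hp' := hp.of_cons
      have hx' : x ∈ b :: l2 := by
        rcases List.mem_cons.mp hx with h | h
        · exfalso
          have hab : a < b := (List.pairwise_cons.mp hp).1 b (by simp)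
          have hba := hmax b (by simp)
          omega
        · exact h
      exact ih hp' hx' (fun y hy => hmax y (by simp [hy]))

theorem le_getLast?_of_mem {l : List Nat} (hp : l.Pairwise (· < ·)) {x : Nat}
    (hx : x ∈ l) : ∃ y, l.getLast? = some y ∧ x ≤ y := by
  induction l generalizing x with
  | nil => cases hx
  | cons a l ih =>
    cases l with
    | nil =>
      simp only [List.mem_singleton] at hx
      subst hx; exact ⟨x, rfl, le_refl x⟩
    | cons b l2 =>
      rw [List.getLast?_cons_cons]
      rcases List.mem_cons.mp hx with h | h
      · obtain ⟨y, hy, hby⟩ := ih hp.of_cons (List.mem_cons_self (a := b))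
        have hab : a < b := (List.pairwise_cons.mp hp).1 b (by simp)
        subst h
        exact ⟨y, hy, by omega⟩
      · exact ih hp.of_cons h

theorem find?_range'_eq_some {p : Nat → Bool} {a b c : Nat} (h1 : a ≤ c) (h2 : c < a + b)
    (hc : p c = true) (hlt : ∀ k, a ≤ k → k < c → p k = false) :
    (List.range' a b).find? p = some c := by
  induction b generalizing a with
  | zero => omega
  | succ b ih =>
    rw [List.range'_succ]
    by_cases hac : a = c
    · subst hac
      rw [List.find?_cons_of_pos hc]
    · have hpa : ¬ p a = true := by simp [hlt a (le_refl a) (by omega)]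
      rw [List.find?_cons_of_neg hpa]
      exact ih (by omega) (by omega) (fun k h1k h2k => hlt k (by omega) h2k)

theorem foldl_max_le {α : Type} {l : List α} {f : α → Int} {a c : Int} (h0 : a ≤ c)
    (h : ∀ x ∈ l, f x ≤ c) : l.foldl (fun acc x => max acc (f x)) a ≤ c := by
  induction l generalizing a with
  | nil => exact h0
  | cons x l ih =>
    simp only [List.foldl_cons]
    exact ih (max_le h0 (h x (by simp))) (fun y hy => h y (by simp [hy]))

theorem set_map_range {n m : Nat} (f : Nat → Int) (v : Int) (_hm : m < n) :
    ((List.range n).map f).set m v = (List.range n).map (fun j => if j = m then v else f j) := by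
  apply List.ext_getElem
  · simp
  · intro k h1 h2
    simp only [List.getElem_set, List.getElem_map, List.getElem_range]
    by_cases hk : m = k
    · subst hk; simp
    · simp [hk, Ne.symm hk]

theorem getD_map_range' {n k : Nat} (f : Nat → Int) (hk : k < n) :
    ((List.range n).map f).getD k 0 = f k := by
  rw [List.getD_eq_getElem _ _ (by simpa using hk)]
  simp

-- ---------- scanL / scanR specifications ----------

theorem scanL_le (T : List Int) (h s : Int) : scanL T h s ≤ s := by
  fun_induction scanL T h s with
  | case1 l c ih => omega
  | case2 l c => omega

theorem scanL_ge (T : List Int) (h s : Int) (hs : -1 ≤ s) : -1 ≤ scanL T h s := by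
  fun_induction scanL T h s with
  | case1 l c ih => exact ih (by omega)
  | case2 l c => omega

theorem scanL_mid (T : List Int) (h s m : Int) (h1 : scanL T h s < m) (h2 : m ≤ s) :
    h ≤ PySem.List.pyGetD T m 0 := by
  fun_induction scanL T h s with
  | case1 l c ih =>
    by_cases hm : m = l
    · subst hm; exact c.2
    · exact ih h1 (by omega)
  | case2 l c => omega

theorem scanL_stop (T : List Int) (h s : Int) (h0 : 0 ≤ scanL T h s) :
    PySem.List.pyGetD T (scanL T h s) 0 < h := by
  fun_induction scanL T h s with
  | case1 l c ih => exact ih h0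
  | case2 l c =>
    push Not at c
    exact c (by omega)

theorem scanR_ge (T : List Int) (h n r : Int) : r ≤ scanR T h n r := by
  fun_induction scanR T h n r with
  | case1 l c ih => omega
  | case2 l c => omega

theorem scanR_le (T : List Int) (h n r : Int) (hr : r ≤ n) : scanR T h n r ≤ n := by
  fun_induction scanR T h n r with
  | case1 l c ih => exact ih (by omega)
  | case2 l c => omega

theorem scanR_mid (T : List Int) (h n r m : Int) (h1 : r ≤ m) (h2 : m < scanR T h n r) :
    h ≤ PySem.List.pyGetD T m 0 := by
  fun_induction scanR T h n r with
  | case1 l c ih =>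
    by_cases hm : m = l
    · subst hm; exact c.2
    · exact ih (by omega) h2
  | case2 l c => omega

theorem scanR_stop (T : List Int) (h n r : Int) (hlt : scanR T h n r < n) :
    PySem.List.pyGetD T (scanR T h n r) 0 < h := by
  fun_induction scanR T h n r with
  | case1 l c ih => exact ih hlt
  | case2 l c =>
    push Not at c
    exact c hlt

-- ---------- the popping loop ----------

theorem popA_spec (T : List Int) (i : Int) (st : List Nat) (RS : List Int)
    (hmono : st.Pairwise (fun a b => tg T a ≤ tg T b)) :
    popA T i ((-1) :: st.map (fun (j : Nat) => (j : Int))) RS =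
      ((-1) :: (st.filter (fun j => decide (tg T j ≤ PySem.List.pyGetD T i 0))).map (fun (j : Nat) => (j : Int)),
       (st.filter (fun j => decide (PySem.List.pyGetD T i 0 < tg T j))).foldr
         (fun (j : Nat) (R : List Int) => PySem.List.pySetD R (j : Int) i) RS) := by
  induction st using List.reverseRecOn generalizing RS with
  | nil =>
    rw [popA]
    have hg : PySem.List.pyGetD [(-1 : Int)] (-1) 0 = -1 := by decide
    rw [dif_neg (by simp [hg])]
    simp
  | append_singleton st' a ih =>
    have hcast : (-1 : Int) :: (st' ++ [a]).map (fun (j : Nat) => (j : Int)) =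
        ((-1 : Int) :: st'.map (fun (j : Nat) => (j : Int))) ++ [(a : Int)] := by simp
    rw [hcast, popA]
    simp only [PySem.List.pyGetD_neg_one_append_singleton, PySem.List.pyGetD_natCast]
    have hmono' : st'.Pairwise (fun a b => tg T a ≤ tg T b) := (List.pairwise_append.mp hmono).1
    have hub : ∀ x ∈ st', tg T x ≤ tg T a := by
      intro x hx
      exact (List.pairwise_append.mp hmono).2.2 x hx a (by simp)
    by_cases hc : PySem.List.pyGetD T i 0 < T.getD a 0
    · rw [dif_pos ⟨by simp, by omega, by exact hc⟩]
      rw [List.dropLast_concat]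
      rw [ih _ hmono']
      have hpa : (decide (tg T a ≤ PySem.List.pyGetD T i 0)) = false := by
        simp only [decide_eq_false_iff_not, not_le]
        exact hc
      have hqa : (decide (PySem.List.pyGetD T i 0 < tg T a)) = true := by
        simp only [decide_eq_true_eq]
        exact hc
      simp [List.filter_append, List.foldr_append, hpa, hqa]
    · rw [dif_neg (by
        intro hcon
        exact hc hcon.2.2)]
      have hpall : (st' ++ [a]).filter (fun j => decide (tg T j ≤ PySem.List.pyGetD T i 0)) =
          st' ++ [a] := by
        rw [List.filter_eq_self]
        intro x hx
        simp only [decide_eq_true_eq]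
        rcases List.mem_append.mp hx with h | h
        · calc tg T x ≤ tg T a := hub x h
               _ ≤ _ := by unfold tg; omega
        · simp only [List.mem_singleton] at h
          subst h
          unfold tg; omega
      have hqnil : (st' ++ [a]).filter (fun j => decide (PySem.List.pyGetD T i 0 < tg T j)) =
          [] := by
        rw [List.filter_eq_nil_iff]
        intro x hx
        simp only [decide_eq_true_eq, not_lt]
        rcases List.mem_append.mp hx with h | h
        · calc tg T x ≤ tg T a := hub x h
               _ ≤ _ := by unfold tg; omega
        · simp only [List.mem_singleton] at h
          subst h
          unfold tg; omega
      rw [hpall, hqnil]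
      simp

theorem length_foldr_set (v : List Nat) (i : Int) (RS : List Int) :
    (v.foldr (fun (j : Nat) (R : List Int) => PySem.List.pySetD R (j : Int) i) RS).length = RS.length := by
  induction v with
  | nil => rfl
  | cons j v ih =>
    simp only [List.foldr_cons, PySem.List.length_pySetD]
    exact ih

theorem getD_foldr_set (v : List Nat) (i : Int) (RS : List Int) (k : Nat)
    (hv : ∀ j ∈ v, j < RS.length) :
    (v.foldr (fun (j : Nat) (R : List Int) => PySem.List.pySetD R (j : Int) i) RS).getD k 0 =
      if k ∈ v then i else RS.getD k 0 := by
  induction v with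
  | nil => simp
  | cons j v ih =>
    simp only [List.foldr_cons]
    have hlen : (v.foldr (fun (j : Nat) (R : List Int) => PySem.List.pySetD R (j : Int) i)
        RS).length = RS.length := length_foldr_set v i RS
    have hjlen : j < RS.length := hv j (by simp)
    rw [PySem.List.pySetD_natCast, List.getD_eq_getElem?_getD, List.getElem?_set, hlen]
    by_cases hkj : j = k
    · subst hkj
      simp [hjlen]
    · rw [if_neg hkj, ← List.getD_eq_getElem?_getD, ih (fun x hx => hv x (by simp [hx]))]
      by_cases hk : k ∈ v
      · simp [hk]
      · simp [hk, Ne.symm hkj]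

-- ---------- evolution of the specs ----------

theorem goodB_iff (T : List Int) (m j : Nat) :
    goodB T m j = true ↔ ∀ k, j < k → k < m → tg T j ≤ tg T k := by
  unfold goodB
  rw [List.all_eq_true]
  constructor
  · intro hall k hk1 hk2
    have hm : k ∈ List.range' (j+1) (m - (j+1)) := by
      rw [List.mem_range']
      exact ⟨k - (j+1), by omega, by omega⟩
    simpa using hall k hm
  · intro h k hk
    rw [List.mem_range'] at hk
    obtain ⟨i, hi, rfl⟩ := hk
    simp only [decide_eq_true_eq]
    exact h _ (by omega) (by omega)

theorem stk_pairwise (T : List Int) (m : Nat) :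
    (stkSpec T m).Pairwise (fun a b => tg T a ≤ tg T b) := by
  unfold stkSpec
  have hp : ((List.range m).filter (goodB T m)).Pairwise (· < ·) :=
    List.pairwise_lt_range.filter _
  refine hp.imp_of_mem ?_
  intro a b ha hb hab
  have hga : goodB T m a = true := (List.mem_filter.mp ha).2
  have hbm : b < m := List.mem_range.mp (List.mem_filter.mp hb).1
  exact (goodB_iff T m a).mp hga b hab hbm

theorem stkSpec_succ (T : List Int) (m : Nat) :
    stkSpec T (m+1) = (stkSpec T m).filter (fun j => decide (tg T j ≤ tg T m)) ++ [m] := by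
  unfold stkSpec
  rw [List.range_succ, List.filter_append]
  have h2 : [m].filter (goodB T (m+1)) = [m] := by
    simp [goodB]
  rw [h2]
  congr 1
  rw [List.filter_filter]
  apply List.filter_congr
  intro j hj
  have hjm : j < m := List.mem_range.mp hj
  rw [Bool.eq_iff_iff, Bool.and_eq_true, goodB_iff, goodB_iff]
  simp only [decide_eq_true_eq]
  constructor
  · intro h
    exact ⟨h m hjm (by omega), fun k h1 h2 => h k h1 (by omega)⟩
  · rintro ⟨h2, h1⟩ k hk1 hk2
    by_cases hkm : k = m
    · subst hkm; exact h2
    · exact h1 k hk1 (by omega)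

theorem rPart_succ (T : List Int) (m j : Nat) :
    rPart T (m+1) j =
      if j < m ∧ goodB T m j = true ∧ tg T m < tg T j then (m : Int) else rPart T m j := by
  unfold rPart
  by_cases hjm : j < m
  · have hsplit : List.range' (j+1) ((m+1) - (j+1)) =
        List.range' (j+1) (m - (j+1)) ++ [m] := by
      have h1 : (m+1) - (j+1) = (m - (j+1)) + 1 := by omega
      rw [h1, List.range'_concat]
      congr 2
      omega
    rw [hsplit, List.find?_append]
    by_cases hg : goodB T m j = true
    · have hnone : (List.range' (j+1) (m - (j+1))).find?
          (fun k => decide (tg T k < tg T j)) = none := by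
        rw [List.find?_eq_none]
        intro x hx
        rw [List.mem_range'] at hx
        obtain ⟨i, hi, rfl⟩ := hx
        simp only [decide_eq_true_eq, not_lt]
        exact (goodB_iff T m j).mp hg _ (by omega) (by omega)
      rw [hnone, Option.none_or]
      by_cases hlt : tg T m < tg T j
      · rw [List.find?_cons_of_pos (by simpa using hlt), if_pos ⟨hjm, hg, hlt⟩]
      · rw [List.find?_cons_of_neg (by simpa using hlt), if_neg (by tauto),
          List.find?_nil]
    · rcases hfind : (List.range' (j+1) (m - (j+1))).find?
          (fun k => decide (tg T k < tg T j)) with _ | k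
      · exfalso
        apply hg
        rw [goodB_iff]
        intro k h1 h2
        rw [List.find?_eq_none] at hfind
        have := hfind k (by rw [List.mem_range']; exact ⟨k - (j+1), by omega, by omega⟩)
        simp only [decide_eq_true_eq, not_lt] at this
        exact this
      · rw [if_neg (by tauto), Option.some_or]
  · have h0 : (m+1) - (j+1) = 0 := by omega
    have h0' : m - (j+1) = 0 := by omega
    rw [h0, h0', if_neg (by tauto)]

-- ---------- the main loop invariant ----------

theorem stepA_spec (T : List Int) (m : Nat) (h1 : 1 ≤ m) (h2 : m < T.length) :
    stepA T ((-1) :: (stkSpec T m).map (fun (j : Nat) => (j : Int)), lsSpec T m, rsSpec T m) (m : Int) =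
      ((-1) :: (stkSpec T (m+1)).map (fun (j : Nat) => (j : Int)), lsSpec T (m+1), rsSpec T (m+1)) := by
  obtain ⟨m', rfl⟩ : ∃ m', m = m' + 1 := ⟨m - 1, by omega⟩
  have hTm : PySem.List.pyGetD T ((m' + 1 : Nat) : Int) 0 = tg T (m' + 1) := by
    rw [PySem.List.pyGetD_natCast]; rfl
  have hm1 : ((m' + 1 : Nat) : Int) - 1 = ((m' : Nat) : Int) := by push_cast; ring
  simp only [stepA]
  rw [popA_spec T _ _ _ (stk_pairwise T (m' + 1))]
  simp only [hTm, hm1, PySem.List.pyGetD_natCast, Prod.mk.injEq]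
  refine ⟨?_, ?_, ?_⟩
  · -- stack component
    rw [stkSpec_succ T (m' + 1), List.map_append]
    simp
  · -- LS component
    have hlen : m' + 1 < T.length := h2
    simp only [show T.getD m' 0 = tg T m' from rfl]
    have hlsv : (if tg T (m' + 1) = tg T m' 
        then (lsSpec T (m' + 1)).getD m' 0
        else PySem.List.pyGetD
          ((-1 : Int) :: ((stkSpec T (m' + 1)).filter
            (fun j => decide (tg T j ≤ tg T (m' + 1)))).map (fun (j : Nat) => (j : Int))) (-1) 0)
        = lsA T (m' + 1) := by
      have hlsA : lsA T (m' + 1) =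
          if tg T (m' + 1) = tg T m' then lsA T m' else gA T (m' + 1) := rfl
      rw [hlsA]
      by_cases he : tg T (m' + 1) = tg T m'
      · rw [if_pos he, if_pos (by exact he)]
        rw [lsSpec, getD_map_range' _ (by omega), if_pos (by omega)]
      · rw [if_neg he, if_neg (by exact he)]
        unfold gA
        rcases hl : ((stkSpec T (m' + 1)).filter
            (fun k => decide (tg T k ≤ tg T (m' + 1)))).getLast? with _ | k
        · rw [List.getLast?_eq_none_iff.mp hl]
          decide
        · obtain ⟨ys, hys⟩ := List.getLast?_eq_some_iff.mp hl
          rw [hys, List.map_append]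
          have hshape : ((-1 : Int) :: (ys.map (fun (j : Nat) => (j : Int)) ++
              [k].map (fun (j : Nat) => (j : Int)))) =
              ((-1 : Int) :: ys.map (fun (j : Nat) => (j : Int))) ++ [(k : Int)] := by simp
          rw [hshape, PySem.List.pyGetD_neg_one_append_singleton]
    rw [hlsv, PySem.List.pySetD_natCast]
    unfold lsSpec
    rw [set_map_range _ _ hlen]
    apply List.map_congr_left
    intro j hj
    by_cases hjm : j = m' + 1
    · subst hjm
      simp
    · rw [if_neg hjm]
      by_cases hlt : j < m' + 1
      · rw [if_pos hlt, if_pos (by omega)]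
      · rw [if_neg hlt, if_neg (by omega)]
  · -- RS component
    have hvsub : ∀ j ∈ (stkSpec T (m' + 1)).filter
        (fun j => decide (tg T (m' + 1) < tg T j)), j < (rsSpec T (m' + 1)).length := by
      intro j hj
      have : j ∈ List.range (m' + 1) := (List.mem_filter.mp ((List.mem_filter.mp hj).1)).1
      have hjm : j < m' + 1 := List.mem_range.mp this
      simp only [rsSpec, List.length_map, List.length_range]
      omega
    apply List.ext_getElem
    · rw [length_foldr_set]
      simp [rsSpec]
    · intro k hk1 hk2
      have hkn : k < T.length := by
        simpa [rsSpec] using hk2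
      rw [← List.getD_eq_getElem _ 0 hk1, ← List.getD_eq_getElem _ 0 hk2]
      rw [getD_foldr_set _ _ _ _ hvsub]
      rw [show rsSpec T (m' + 1 + 1) = (List.range T.length).map (fun j => rPart T (m' + 1 + 1) j) from rfl]
      rw [getD_map_range' _ hkn, rPart_succ]
      have hmem : (k ∈ (stkSpec T (m' + 1)).filter
          (fun j => decide (tg T (m' + 1) < tg T j))) ↔
          (k < m' + 1 ∧ goodB T (m' + 1) k = true ∧ tg T (m' + 1) < tg T k) := by
        simp only [List.mem_filter, stkSpec, List.mem_range, decide_eq_true_eq]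
        tauto
      by_cases hc : k < m' + 1 ∧ goodB T (m' + 1) k = true ∧ tg T (m' + 1) < tg T k
      · rw [if_pos (hmem.mpr hc), if_pos hc]
      · rw [if_neg (fun h => hc (hmem.mp h)), if_neg hc]
        rw [show rsSpec T (m' + 1) = (List.range T.length).map (fun j => rPart T (m' + 1) j) from rfl]
        rw [getD_map_range' _ hkn]

theorem loopA (T : List Int) (m : Nat) (h1 : 1 ≤ m) (h2 : m ≤ T.length) :
    (PySem.List.pyRange 1 (m : Int) 1).foldl (stepA T)
        ([-1, 0],
         (PySem.List.pyRange 0 (T.length : Int) 1).map (fun _ => (-1 : Int)),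
         (PySem.List.pyRange 0 (T.length : Int) 1).map (fun _ => (T.length : Int))) =
      ((-1) :: (stkSpec T m).map (fun (j : Nat) => (j : Int)), lsSpec T m, rsSpec T m) := by
  induction m, h1 using Nat.le_induction with
  | base =>
    rw [show ((1 : Nat) : Int) = 1 from rfl,
      PySem.List.pyRange_one_eq_nil (a := 1) (b := 1) le_rfl]
    rw [List.foldl_nil]
    refine congrArg₂ Prod.mk ?_ (congrArg₂ Prod.mk ?_ ?_)
    · have h0 : stkSpec T 1 = [0] := by
        simp [stkSpec, goodB]
      rw [h0]
      simp
    · rw [PySem.List.pyRange_zero_nat, List.map_map]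
      unfold lsSpec
      apply List.map_congr_left
      intro j _
      rcases Nat.eq_zero_or_pos j with hj | hj
      · subst hj
        simp [lsA]
      · simp only [Function.comp]
        rw [if_neg (by omega)]
    · rw [PySem.List.pyRange_zero_nat, List.map_map]
      unfold rsSpec
      apply List.map_congr_left
      intro j _
      simp only [Function.comp]
      have h0 : 1 - (j + 1) = 0 := by omega
      unfold rPart
      rw [h0]
      rfl
  | succ m hm ih =>
    have hcast : ((m + 1 : Nat) : Int) = ((m : Nat) : Int) + 1 := by push_cast; ring
    rw [hcast, PySem.List.pyRange_one_succ_right (by omega), List.foldl_append,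
      List.foldl_cons, List.foldl_nil]
    rw [ih (by omega)]
    exact stepA_spec T m hm (by omega)

-- ---------- relating A's per-index data to B's scans ----------

theorem gA_ge (T : List Int) (m : Nat) : -1 ≤ gA T m := by
  unfold gA
  rcases ((stkSpec T m).filter (fun k => decide (tg T k ≤ tg T m))).getLast? with _ | k
  · show (-1 : Int) ≤ -1
    omega
  · show (-1 : Int) ≤ (k : Int)
    omega

theorem mem_stk_of_getLast?_filter {T : List Int} {m : Nat} {p : Nat → Bool} {k : Nat}
    (hl : ((stkSpec T m).filter p).getLast? = some k) : k ∈ stkSpec T m := by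
  obtain ⟨ys, hys⟩ := List.getLast?_eq_some_iff.mp hl
  have hk : k ∈ (stkSpec T m).filter p := by
    rw [hys]
    simp
  exact (List.mem_filter.mp hk).1

theorem rPart_ge (T : List Int) (j : Nat) (hj : j < T.length) :
    (j : Int) + 1 ≤ rPart T T.length j := by
  unfold rPart
  rcases h : (List.range' (j+1) (T.length - (j+1))).find? (fun k => decide (tg T k < tg T j))
      with _ | k
  · show (j : Int) + 1 ≤ (T.length : Int)
    omega
  · have hk := List.mem_of_find?_eq_some h
    rw [List.mem_range'] at hk
    obtain ⟨i, hi, rfl⟩ := hk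
    show (j : Int) + 1 ≤ ((j + 1 + 1 * i : Nat) : Int)
    push_cast
    omega

theorem lsA_lt (T : List Int) (j : Nat) : lsA T j < (j : Int) := by
  induction j with
  | zero =>
    show (-1 : Int) < 0
    omega
  | succ j ih =>
    rw [show lsA T (j+1) = if tg T (j+1) = tg T j then lsA T j else gA T (j+1) from rfl]
    split_ifs with he
    · push_cast
      omega
    · unfold gA
      rcases hl : ((stkSpec T (j+1)).filter (fun k => decide (tg T k ≤ tg T (j+1)))).getLast?
          with _ | k
      · show (-1 : Int) < ((j + 1 : Nat) : Int)
        push_cast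
        omega
      · have hk : k ∈ stkSpec T (j+1) := mem_stk_of_getLast?_filter hl
        have : k < j + 1 := List.mem_range.mp (List.mem_filter.mp hk).1
        show (k : Int) < ((j + 1 : Nat) : Int)
        push_cast
        omega

theorem lsA_ge_scanL (T : List Int) (j : Nat) :
    scanL T (tg T j) ((j : Int) - 1) ≤ lsA T j := by
  induction j with
  | zero =>
    rw [show ((0 : Nat) : Int) - 1 = -1 by simp]
    rw [scanL, dif_neg (by rintro ⟨h, -⟩; omega)]
    show (-1 : Int) ≤ -1
    omega
  | succ j ih =>
    rw [show ((j + 1 : Nat) : Int) - 1 = ((j : Nat) : Int) by push_cast; ring]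
    by_cases he : tg T (j+1) = tg T j
    · rw [show lsA T (j+1) = if tg T (j+1) = tg T j then lsA T j else gA T (j+1) from rfl,
        if_pos he]
      rw [scanL, dif_pos ⟨by omega, by
        rw [PySem.List.pyGetD_natCast]
        exact ge_of_eq (by rw [he]; rfl)⟩]
      rw [he]
      exact ih
    · rw [show lsA T (j+1) = if tg T (j+1) = tg T j then lsA T j else gA T (j+1) from rfl,
        if_neg he]
      by_cases h0 : 0 ≤ scanL T (tg T (j+1)) ((j : Nat) : Int)
      · have hle : scanL T (tg T (j+1)) ((j : Nat) : Int) ≤ ((j : Nat) : Int) :=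
          scanL_le T _ _
        have hstop := scanL_stop T (tg T (j+1)) ((j : Nat) : Int) h0
        have hLl : ((scanL T (tg T (j+1)) ((j : Nat) : Int)).toNat : Int) =
            scanL T (tg T (j+1)) ((j : Nat) : Int) := Int.toNat_of_nonneg h0
        have hstop' : tg T (scanL T (tg T (j+1)) ((j : Nat) : Int)).toNat < tg T (j+1) := by
          rw [← hLl, PySem.List.pyGetD_natCast] at hstop
          exact hstop
        have hmemw : (scanL T (tg T (j+1)) ((j : Nat) : Int)).toNat ∈
            (stkSpec T (j+1)).filter (fun k => decide (tg T k ≤ tg T (j+1))) := by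
          rw [List.mem_filter]
          refine ⟨?_, by simp only [decide_eq_true_eq]; omega⟩
          rw [stkSpec, List.mem_filter]
          refine ⟨List.mem_range.mpr (by omega), ?_⟩
          rw [goodB_iff]
          intro k hk1 hk2
          have hmid := scanL_mid T (tg T (j+1)) ((j : Nat) : Int) (k : Int)
            (by omega) (by omega)
          rw [PySem.List.pyGetD_natCast] at hmid
          have : tg T k = T.getD k 0 := rfl
          omega
        have hpw : ((stkSpec T (j+1)).filter
            (fun k => decide (tg T k ≤ tg T (j+1)))).Pairwise (· < ·) :=
          (List.pairwise_lt_range.filter _).filter _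
        obtain ⟨y, hy, hLy⟩ := le_getLast?_of_mem hpw hmemw
        unfold gA
        rw [hy]
        show _ ≤ (y : Int)
        omega
      · have := scanL_ge T (tg T (j+1)) ((j : Nat) : Int) (by omega)
        have h1 : scanL T (tg T (j+1)) ((j : Nat) : Int) = -1 := by omega
        rw [h1]
        exact gA_ge T (j+1)

theorem rPart_eq_of (T : List Int) (j : Nat) (c : Int) (hj : j < T.length)
    (h1 : (j : Int) < c) (h2 : c ≤ (T.length : Int))
    (hmid : ∀ k : Nat, j < k → (k : Int) < c → tg T j ≤ tg T k)
    (hstop : c < (T.length : Int) → PySem.List.pyGetD T c 0 < tg T j) :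
    rPart T T.length j = c := by
  have hc0 : 0 ≤ c := by omega
  have hC : ((c.toNat : Nat) : Int) = c := Int.toNat_of_nonneg hc0
  have hjC : j < c.toNat := by omega
  have hCle : c.toNat ≤ T.length := by omega
  unfold rPart
  by_cases hCn : c.toNat = T.length
  · rw [List.find?_eq_none.mpr ?_]
    · show (T.length : Int) = c
      omega
    · intro x hx
      rw [List.mem_range'] at hx
      obtain ⟨ix, hix, rfl⟩ := hx
      simp only [decide_eq_true_eq, not_lt]
      exact hmid _ (by omega) (by push_cast; omega)
  · have hCless : c.toNat < T.length := by omega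
    rw [find?_range'_eq_some (c := c.toNat) (by omega) (by omega) ?_ ?_]
    · show ((c.toNat : Nat) : Int) = c
      omega
    · simp only [decide_eq_true_eq]
      have hs := hstop (by omega)
      rw [← hC, PySem.List.pyGetD_natCast] at hs
      exact hs
    · intro k hk1 hk2
      simp only [decide_eq_false_iff_not, not_lt]
      exact hmid k (by omega) (by omega)

theorem rPart_eq_scanR (T : List Int) (j : Nat) (hj : j < T.length) :
    rPart T T.length j = scanR T (tg T j) (T.length : Int) ((j : Int) + 1) := by
  have hge := scanR_ge T (tg T j) (T.length : Int) ((j : Int) + 1)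
  apply rPart_eq_of T j _ hj
  · omega
  · exact scanR_le T _ _ _ (by omega)
  · intro k hk1 hk2
    have hmid := scanR_mid T (tg T j) (T.length : Int) ((j : Int) + 1) (k : Int)
      (by omega) hk2
    rw [PySem.List.pyGetD_natCast] at hmid
    exact hmid
  · intro hlt
    exact scanR_stop T _ _ _ hlt

theorem leader_lsA (T : List Int) (i J : Nat) (L : Int)
    (hge : -1 ≤ L) (hJle : J ≤ i)
    (hstop : 0 ≤ L → PySem.List.pyGetD T L 0 < tg T i)
    (hJ1 : L < (J : Int)) (hJ2 : tg T J = tg T i)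
    (hstrict : ∀ k : Nat, L < (k : Int) → k < J → tg T i < tg T k) :
    lsA T J = L := by
  cases J with
  | zero =>
    show (-1 : Int) = L
    omega
  | succ j' =>
    have hne : tg T (j' + 1) ≠ tg T j' := by
      by_cases hc : L < (j' : Int)
      · have h1 := hstrict j' hc (by omega)
        omega
      · have hLj : L = (j' : Int) := by omega
        have h2 := hstop (by omega)
        rw [hLj, PySem.List.pyGetD_natCast] at h2
        have h3 : tg T j' = T.getD j' 0 := rfl
        omega
    rw [show lsA T (j' + 1) = if tg T (j' + 1) = tg T j' then lsA T j' else gA T (j' + 1)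
      from rfl, if_neg hne]
    by_cases hL0 : 0 ≤ L
    · have hLt : ((L.toNat : Nat) : Int) = L := Int.toNat_of_nonneg hL0
      have hstop' : tg T L.toNat < tg T i := by
        have := hstop hL0
        rw [← hLt, PySem.List.pyGetD_natCast] at this
        exact this
      have hmemw : L.toNat ∈ (stkSpec T (j' + 1)).filter
          (fun k => decide (tg T k ≤ tg T (j' + 1))) := by
        rw [List.mem_filter]
        refine ⟨?_, by simp only [decide_eq_true_eq]; omega⟩
        rw [stkSpec, List.mem_filter]
        refine ⟨List.mem_range.mpr (by omega), ?_⟩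
        rw [goodB_iff]
        intro k hk1 hk2
        have := hstrict k (by omega) (by omega)
        omega
      have hmax : ∀ y ∈ (stkSpec T (j' + 1)).filter
          (fun k => decide (tg T k ≤ tg T (j' + 1))), y ≤ L.toNat := by
        intro y hy
        have hdec := (List.mem_filter.mp hy).2
        simp only [decide_eq_true_eq] at hdec
        by_contra hcon
        have := hstrict y (by omega)
          (List.mem_range.mp (List.mem_filter.mp (List.mem_filter.mp hy).1).1)
        omega
      have hpw : ((stkSpec T (j' + 1)).filter
          (fun k => decide (tg T k ≤ tg T (j' + 1)))).Pairwise (· < ·) :=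
        (List.pairwise_lt_range.filter _).filter _
      unfold gA
      rw [getLast?_of_pairwise_lt hpw hmemw hmax]
      show ((L.toNat : Nat) : Int) = L
      omega
    · have hwnil : (stkSpec T (j' + 1)).filter
          (fun k => decide (tg T k ≤ tg T (j' + 1))) = [] := by
        rw [List.filter_eq_nil_iff]
        intro x hx
        simp only [decide_eq_true_eq, not_le]
        have := hstrict x (by omega) (List.mem_range.mp (List.mem_filter.mp hx).1)
        omega
      unfold gA
      rw [hwnil]
      show (-1 : Int) = L
      omega

-- the "leader" of i's window: the leftmost index with i's value inside it
theorem leader_term (T : List Int) (i : Nat) (hi : i < T.length) (hpos : 0 < tg T i) :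
    ∃ j : Nat, j < T.length ∧
      tg T j = tg T i ∧
      lsA T j = scanL T (tg T i) ((i : Int) - 1) ∧
      rPart T T.length j = scanR T (tg T i) (T.length : Int) ((i : Int) + 1) := by
  have hge : -1 ≤ scanL T (tg T i) ((i : Int) - 1) := scanL_ge T _ _ (by omega)
  have hle : scanL T (tg T i) ((i : Int) - 1) ≤ (i : Int) - 1 := scanL_le T _ _
  have hex : ∃ j : Nat, scanL T (tg T i) ((i : Int) - 1) < (j : Int) ∧ tg T j = tg T i :=
    ⟨i, by omega, rfl⟩
  have hspec := Nat.find_spec hex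
  have hJle : Nat.find hex ≤ i := Nat.find_min' hex ⟨by omega, rfl⟩
  have hstrict : ∀ k : Nat, scanL T (tg T i) ((i : Int) - 1) < (k : Int) →
      k < Nat.find hex → tg T i < tg T k := by
    intro k hk1 hk2
    have hne := Nat.find_min hex hk2
    have hmid := scanL_mid T (tg T i) ((i : Int) - 1) (k : Int) hk1 (by omega)
    rw [PySem.List.pyGetD_natCast] at hmid
    have h3 : tg T k = T.getD k 0 := rfl
    have h4 : tg T k ≠ tg T i := fun h => hne ⟨hk1, h⟩
    omega
  refine ⟨Nat.find hex, by omega, hspec.2, ?_, ?_⟩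
  · exact leader_lsA T i (Nat.find hex) _ hge hJle
      (fun h0 => scanL_stop T _ _ h0) hspec.1 hspec.2 hstrict
  · have hrge := scanR_ge T (tg T i) (T.length : Int) ((i : Int) + 1)
    apply rPart_eq_of T _ _ (by omega)
    · omega
    · exact scanR_le T _ _ _ (by omega)
    · intro k hk1 hk2
      rw [hspec.2]
      by_cases hki : k = i
      · subst hki
        omega
      · by_cases hklt : k < i
        · have hmid := scanL_mid T (tg T i) ((i : Int) - 1) (k : Int)
            (by have := hspec.1; omega) (by omega)
          rw [PySem.List.pyGetD_natCast] at hmid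
          exact hmid
        · have hmid := scanR_mid T (tg T i) (T.length : Int) ((i : Int) + 1) (k : Int)
            (by omega) hk2
          rw [PySem.List.pyGetD_natCast] at hmid
          exact hmid
    · intro hlt
      rw [hspec.2]
      exact scanR_stop T _ _ _ hlt

-- ---------- assembling the two results ----------

theorem main_eq (T : List Int) : inwestor T = inwestor_alt T := by
  rcases Nat.eq_zero_or_pos T.length with hn | hn
  · have hT : T = [] := List.eq_nil_of_length_eq_zero hn
    subst hT
    decide
  · simp only [inwestor, inwestor_alt]
    rw [loopA T T.length hn le_rfl]
    rw [PySem.List.pyRange_zero_nat]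
    simp only [List.foldl_map]
    trans (List.range T.length).foldl
      (fun (acc : Int) (j : Nat) => max acc (tg T j * (rPart T T.length j - lsA T j - 1))) 0
    · apply PySem.List.foldl_congr_mem
      intro acc x hx
      have hxn : x < T.length := List.mem_range.mp hx
      simp only [PySem.List.pyGetD_natCast]
      rw [show (rsSpec T T.length).getD x 0 = rPart T T.length x from by
        unfold rsSpec; exact getD_map_range' _ hxn]
      rw [show (lsSpec T T.length).getD x 0 = lsA T x from by
        unfold lsSpec; rw [getD_map_range' _ hxn, if_pos hxn]]
      rfl
    trans (List.range T.length).foldl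
      (fun (acc : Int) (j : Nat) => max acc (tg T j *
        (scanR T (tg T j) (T.length : Int) ((j : Int) + 1) -
         scanL T (tg T j) ((j : Int) - 1) - 1))) 0
    · apply le_antisymm
      · apply foldl_max_le
        · exact (PySem.List.le_foldl_max_int (List.range T.length) _ 0).1
        · intro x hx
          have hxn : x < T.length := List.mem_range.mp hx
          have hr := rPart_eq_scanR T x hxn
          have hl := lsA_ge_scanL T x
          by_cases hp : 0 < tg T x
          · refine le_trans ?_ ((PySem.List.le_foldl_max_int (List.range T.length) _ 0).2 x hx)
            have hw : rPart T T.length x - lsA T x - 1 ≤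
                scanR T (tg T x) (T.length : Int) ((x : Int) + 1) -
                scanL T (tg T x) ((x : Int) - 1) - 1 := by omega
            exact mul_le_mul_of_nonneg_left hw (le_of_lt hp)
          · have hwge : 0 ≤ rPart T T.length x - lsA T x - 1 := by
              have h2 := rPart_ge T x hxn
              have h3 := lsA_lt T x
              omega
            have h1 : tg T x * (rPart T T.length x - lsA T x - 1) ≤ 0 := by
              nlinarith [Int.not_lt.mp hp, hwge]
            exact le_trans h1 (PySem.List.le_foldl_max_int (List.range T.length) _ 0).1
      · apply foldl_max_le
        · exact (PySem.List.le_foldl_max_int (List.range T.length) _ 0).1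
        · intro x hx
          have hxn : x < T.length := List.mem_range.mp hx
          by_cases hp : 0 < tg T x
          · obtain ⟨j, hjn, hjv, hjls, hjr⟩ := leader_term T x hxn hp
            have heq : tg T x * (scanR T (tg T x) (T.length : Int) ((x : Int) + 1) -
                scanL T (tg T x) ((x : Int) - 1) - 1) =
                tg T j * (rPart T T.length j - lsA T j - 1) := by
              rw [hjv, hjls, hjr]
            rw [heq]
            exact (PySem.List.le_foldl_max_int (List.range T.length) _ 0).2 j
              (List.mem_range.mpr hjn)
          · have hge := scanR_ge T (tg T x) (T.length : Int) ((x : Int) + 1)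
            have hle := scanL_le T (tg T x) ((x : Int) - 1)
            have hwge : 0 ≤ scanR T (tg T x) (T.length : Int) ((x : Int) + 1) -
                scanL T (tg T x) ((x : Int) - 1) - 1 := by omega
            have h1 : tg T x * (scanR T (tg T x) (T.length : Int) ((x : Int) + 1) -
                scanL T (tg T x) ((x : Int) - 1) - 1) ≤ 0 := by
              nlinarith [Int.not_lt.mp hp, hwge]
            exact le_trans h1 (PySem.List.le_foldl_max_int (List.range T.length) _ 0).1
    · refine (PySem.List.foldl_congr_mem _ _ _ _ ?_).symm
      intro acc x hx
      simp only [PySem.List.pyGetD_natCast]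
      rfl

-- ===== VERDICT (by name: the statement is the Claim_ definition above) =====
theorem inwestor_spec : Claim_equal_inwestor := by
  intro T _
  unfold Spec_inwestor
  exact main_eq T
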